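-- pv_equiv track=rewrite | github.com/GarmOfGnipahellir/advent-of-code | 2019/04/2/main.py | has_double
-- ===== SOURCE A (Python) =====
-- def has_double(num):
--     num = [int(x) for x in list(str(num))]
--     seqs = []
--     count = 0
--     for i in range(1, len(num)):
--         prev = num[i-1]
--         cur = num[i]
--         count += 1
--         if prev != cur:
--             seqs.append(count)
--             count = 0
--         elif i == len(num) - 1:
--             if prev == cur:
--                 count += 1
--             seqs.append(count)
--     return 2 in seqs
-- ===== SOURCE B (Python) =====
-- def has_double(num):
--     digits = [int(x) for x in str(num)]
--
--     def scan(prev, rest, runlen):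
--         if not rest:
--             return runlen == 2
--         if rest[0] == prev:
--             return scan(prev, rest[1:], runlen + 1)
--         return runlen == 2 or scan(rest[0], rest[1:], 1)
--
--     return scan(digits[0], digits[1:], 1)
-- ===== Notes on version B (the rewrite author's own statement) =====
-- stated objective: simpler
-- what changed: Replaces A's index loop that accumulates a list of run lengths (count/seqs with a trailing-index special case) by a short-circuiting recursive scan carrying only the current run length, returning as soon as a run of exactly two is closed; no list of lengths is built.
import Mathlib
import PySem

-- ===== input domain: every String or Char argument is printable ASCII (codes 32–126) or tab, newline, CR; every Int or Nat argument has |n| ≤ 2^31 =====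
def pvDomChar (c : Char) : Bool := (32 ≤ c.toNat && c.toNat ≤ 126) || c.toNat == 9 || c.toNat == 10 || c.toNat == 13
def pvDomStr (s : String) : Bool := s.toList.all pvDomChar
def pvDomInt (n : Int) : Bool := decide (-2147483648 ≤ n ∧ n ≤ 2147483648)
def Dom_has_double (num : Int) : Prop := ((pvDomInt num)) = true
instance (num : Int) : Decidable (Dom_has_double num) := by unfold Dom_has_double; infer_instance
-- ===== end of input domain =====

-- B replaces A's run-length-list accumulation (count/seqs with a last-index special case)
-- by a short-circuiting recursive scan of runs; equivalence of the return values is proved on Pre_ (num ≥ 0).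

-- ===== PORT A =====
-- digits of str(num): int(x) for each character x (under Pre_ every character is a digit, so .getD 0 is never reached)
def pvDigits (num : Int) : List Int :=
  (PySem.Int.toStr num).toList.map (fun c => (PySem.Int.ofStr? (String.mk [c])).getD 0)

-- the for-loop over range(1, len(num)): prev is num[i-1], rest the digits from index i on;
-- same state (count, seqs), branches in the Python's order (incl. the redundant inner prev == cur test)
def pvALoop (prev : Int) (rest : List Int) (count : Int) (seqs : List Int) : List Int :=
  match rest with
  | [] => seqs
  | cur :: rs =>
      let count := count + 1
      if prev != cur then
        pvALoop cur rs 0 (seqs ++ [count])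
      else if rs.isEmpty then
        (if prev == cur then seqs ++ [count + 1] else seqs ++ [count])
      else
        pvALoop cur rs count seqs

def has_double (num : Int) : Bool :=
  let ds := pvDigits num
  let seqs := match ds with
    | [] => ([] : List Int)        -- range(1, len) is empty
    | d :: rest => pvALoop d rest 0 []
  seqs.contains 2

-- ===== PORT B =====
-- digits = [int(x) for x in str(num)] as written in Source B (same line as A's; ported separately)
def pvDigitsB (num : Int) : List Int :=
  (PySem.Int.toStr num).toList.map (fun c => (PySem.Int.ofStr? (String.mk [c])).getD 0)

-- scan(prev, rest, runlen) from Source B, literally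
def pvBScan (prev : Int) (rest : List Int) (runlen : Int) : Bool :=
  match rest with
  | [] => runlen == 2
  | cur :: rs =>
      if cur == prev then pvBScan prev rs (runlen + 1)
      else (runlen == 2 || pvBScan cur rs 1)

def has_double_alt (num : Int) : Bool :=
  let digits := pvDigitsB num
  match digits with
  | [] => false                    -- unreachable: str(num) is never empty, digits[0] always exists
  | d :: rest => pvBScan d rest 1

-- ===== PRECONDITION & SPEC =====
-- Pre_ excludes negative num, on which A raises ValueError (int('-') on the sign character).
def Pre_has_double (num : Int) : Prop := 0 ≤ num
instance (num : Int) : Decidable (Pre_has_double num) := by unfold Pre_has_double; infer_instance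
def pvWitness_has_double : Int := (122345)

def Spec_has_double (num : Int) (out : Bool) : Prop := out = has_double_alt num
instance (num : Int) (out : Bool) : Decidable (Spec_has_double num out) := by unfold Spec_has_double; infer_instance

-- ===== CLAIM (what is proved, stated in full; the proofs are below) =====
def Claim_equal_has_double : Prop := ∀ (num : Int), Dom_has_double num → Pre_has_double num → Spec_has_double num (has_double num)

-- ===== LEMMAS AND PROOFS =====

lemma pv_beq2 (x : Int) : decide (2 = x) = (x == 2) := by
  rcases eq_or_ne x 2 with h | h
  · subst h; rfl
  · have h1 : decide (2 = x) = false := by simp [Ne.symm h]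
    have h2 : (x == 2) = false := by simp [h]
    rw [h1, h2]

lemma pv_key : ∀ (rest : List Int) (prev c : Int) (seqs : List Int), (rest = [] → c = 0) →
    (pvALoop prev rest c seqs).contains 2 = (seqs.contains 2 || pvBScan prev rest (c + 1)) := by
  intro rest
  induction rest with
  | nil =>
      intro prev c seqs h
      simp [pvALoop, pvBScan, h rfl]
  | cons cur rs ih =>
      intro prev c seqs _
      simp only [pvALoop, pvBScan]
      by_cases hpc : prev = cur
      · subst hpc
        simp only [bne_self_eq_false, Bool.false_eq_true, beq_self_eq_true, if_pos, ite_false]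
        cases rs with
        | nil =>
            simp [pvBScan, pv_beq2]
        | cons r rs' =>
            simp only [List.isEmpty_cons, Bool.false_eq_true, ite_false]
            exact ih prev (c + 1) seqs (by simp)
      · have hb : (prev != cur) = true := by simp [bne_iff_ne]; exact hpc
        have hb2 : (cur == prev) = false := by simp [beq_eq_false_iff_ne]; exact (Ne.symm hpc)
        rw [if_pos hb, hb2]
        rw [ih cur 0 (seqs ++ [c + 1]) (fun _ => rfl)]
        simp [Bool.or_assoc, pv_beq2]

theorem pv_main (num : Int) : has_double num = has_double_alt num := by
  unfold has_double has_double_alt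
  rw [show pvDigitsB num = pvDigits num from rfl]
  cases h : pvDigits num with
  | nil => simp
  | cons d rest =>
      simp only []
      rw [pv_key rest d 0 [] (fun _ => rfl)]
      simp

-- ===== VERDICT (by name: the statement is the Claim_ definition above) =====
theorem has_double_spec : Claim_equal_has_double := by
  intro num _ _
  unfold Spec_has_double
  exact pv_main num
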